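-- pv_equiv track=rewrite | github.com/sanskrit-lexicon/PWK | pwkissues/issue88/ablists/make_change.py | change_1a
-- ===== SOURCE A (Python) =====
-- def change_1a(line):
--  replacements = [('<ab>N.ag.</ab>', '<ab>N. ag.</ab>'),
--   ('<ab>N.pr.</ab>', '<ab>N. pr.</ab>'),
--   ('<ab>Nom.abstr.</ab>', '<ab>Nom. abstr.</ab>'),
--   ('<ab>Nom.ag.</ab>', '<ab>Nom. ag.</ab>'),
--   ('<ab>s.u.</ab>', '<ab>s. u.</ab>'),
--   ('<ab>u.s.w.</ab>', '<ab>u. s. w.</ab>'),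
--   ('<ab>v.a.</ab>', '<ab>v. a.</ab>'),
--   ('<ab>v.l.</ab>', '<ab>v. l.</ab>'),
--   ('<ab>v.u.</ab>', '<ab>v. u.</ab>'),]
--  for old,new in replacements:
--   line = line.replace(old,new)
--  return line
-- ===== SOURCE B (Python) =====
-- def change_1a(line):
--     table = {'<ab>N.ag.</ab>': '<ab>N. ag.</ab>',
--              '<ab>N.pr.</ab>': '<ab>N. pr.</ab>',
--              '<ab>Nom.abstr.</ab>': '<ab>Nom. abstr.</ab>',
--              '<ab>Nom.ag.</ab>': '<ab>Nom. ag.</ab>',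
--              '<ab>s.u.</ab>': '<ab>s. u.</ab>',
--              '<ab>u.s.w.</ab>': '<ab>u. s. w.</ab>',
--              '<ab>v.a.</ab>': '<ab>v. a.</ab>',
--              '<ab>v.l.</ab>': '<ab>v. l.</ab>',
--              '<ab>v.u.</ab>': '<ab>v. u.</ab>'}
--     out = []
--     i = 0
--     n = len(line)
--     while i < n:
--         for old, new in table.items():
--             if line.startswith(old, i):
--                 out.append(new)
--                 i += len(old)
--                 break
--         else:
--             out.append(line[i])
--             i += 1
--     return ''.join(out)
-- ===== Notes on version B (the rewrite author's own statement) =====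
-- stated objective: alternative
-- what changed: Replaces nine sequential full-string replace passes by one left-to-right table-driven scan that substitutes each abbreviation as it is encountered (valid because the keys are prefix-incomparable and no replacement text can create or destroy a match).
import Mathlib
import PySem

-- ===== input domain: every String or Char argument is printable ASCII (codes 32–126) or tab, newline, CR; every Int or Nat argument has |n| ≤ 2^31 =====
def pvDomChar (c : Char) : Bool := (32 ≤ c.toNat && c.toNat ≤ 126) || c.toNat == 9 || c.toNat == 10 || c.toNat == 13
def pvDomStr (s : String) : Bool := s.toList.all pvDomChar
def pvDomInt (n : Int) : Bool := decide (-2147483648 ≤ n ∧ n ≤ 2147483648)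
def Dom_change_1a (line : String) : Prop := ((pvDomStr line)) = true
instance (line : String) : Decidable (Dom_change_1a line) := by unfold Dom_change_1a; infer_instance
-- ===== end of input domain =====

-- B replaces nine sequential full-string replace passes by one left-to-right table-driven scan
-- (an alternative algorithm; valid because the keys are prefix-incomparable and no replacement
-- text creates or destroys a match).

-- ===== PORT A =====
def change_1a (line : String) : String :=
  let replacements : List (String × String) :=
    [("<ab>N.ag.</ab>", "<ab>N. ag.</ab>"),
     ("<ab>N.pr.</ab>", "<ab>N. pr.</ab>"),
     ("<ab>Nom.abstr.</ab>", "<ab>Nom. abstr.</ab>"),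
     ("<ab>Nom.ag.</ab>", "<ab>Nom. ag.</ab>"),
     ("<ab>s.u.</ab>", "<ab>s. u.</ab>"),
     ("<ab>u.s.w.</ab>", "<ab>u. s. w.</ab>"),
     ("<ab>v.a.</ab>", "<ab>v. a.</ab>"),
     ("<ab>v.l.</ab>", "<ab>v. l.</ab>"),
     ("<ab>v.u.</ab>", "<ab>v. u.</ab>")]
  replacements.foldl (fun l p => PySem.Str.replace l p.1 p.2) line

-- ===== PORT B =====
-- the dict of Source B, in insertion order, as a char-level association list
def pvTable : List (List Char × List Char) :=
  [("<ab>N.ag.</ab>".toList, "<ab>N. ag.</ab>".toList),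
   ("<ab>N.pr.</ab>".toList, "<ab>N. pr.</ab>".toList),
   ("<ab>Nom.abstr.</ab>".toList, "<ab>Nom. abstr.</ab>".toList),
   ("<ab>Nom.ag.</ab>".toList, "<ab>Nom. ag.</ab>".toList),
   ("<ab>s.u.</ab>".toList, "<ab>s. u.</ab>".toList),
   ("<ab>u.s.w.</ab>".toList, "<ab>u. s. w.</ab>".toList),
   ("<ab>v.a.</ab>".toList, "<ab>v. a.</ab>".toList),
   ("<ab>v.l.</ab>".toList, "<ab>v. l.</ab>".toList),
   ("<ab>v.u.</ab>".toList, "<ab>v. u.</ab>".toList)]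

-- the inner 'for old,new … if line.startswith(old, i): … break / else:' of Source B
def pvFind (l : List Char) : List (List Char × List Char) → Option (List Char × List Char)
  | [] => none
  | p :: rest => if p.1.isPrefixOf l then some p else pvFind l rest

-- the 'while i < n' scan of Source B (advancing by len(old) on a match, by 1 otherwise);
-- the Nat argument is the loop bound n - i of the while loop, making the recursion structural
def pvScanGo : Nat → List Char → List Char
  | _, [] => []
  | 0, _ :: _ => []
  | fuel + 1, c :: t =>
    match pvFind (c :: t) pvTable with
    | some p => p.2 ++ pvScanGo fuel (t.drop (p.1.length - 1))
    | none => c :: pvScanGo fuel t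

def pvScan (l : List Char) : List Char := pvScanGo l.length l

def change_1a_alt (line : String) : String := String.ofList (pvScan line.toList)

-- ===== PRECONDITION & SPEC =====
def Spec_change_1a (line : String) (out : String) : Prop := out = change_1a_alt line
instance (line : String) (out : String) : Decidable (Spec_change_1a line out) := by unfold Spec_change_1a; infer_instance

-- ===== CLAIM (what is proved, stated in full; the proofs are below) =====
def Claim_equal_change_1a : Prop := ∀ (line : String), Dom_change_1a line → Spec_change_1a line (change_1a line)

-- ===== LEMMAS AND PROOFS =====

-- a structural (non-accumulator) version of Python str.replace, agreeing for nonempty patterns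
def pvRep (old new : List Char) : List Char → List Char
  | [] => []
  | c :: t =>
    if old.isPrefixOf (c :: t) then new ++ pvRep old new (t.drop (old.length - 1))
    else c :: pvRep old new t
termination_by l => l.length
decreasing_by all_goals simp

theorem pvGo_eq (old new : List Char) (hold : old ≠ []) :
    ∀ fuel l acc, l.length ≤ fuel →
      PySem.Chars.replace.go old new fuel l acc = acc.reverse ++ pvRep old new l := by
  intro fuel
  induction fuel with
  | zero =>
    intro l acc hl
    have h0 : l = [] := List.eq_nil_of_length_eq_zero (Nat.le_zero.mp hl)
    subst h0
    rw [PySem.Chars.replace.go]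
    simp [pvRep]
  | succ n ih =>
    intro l acc hl
    cases l with
    | nil =>
      rw [PySem.Chars.replace.go]
      · simp [pvRep]
      · omega
    | cons c t =>
      obtain ⟨o, os, rfl⟩ : ∃ o os, old = o :: os := by
        cases old with
        | nil => exact absurd rfl hold
        | cons o os => exact ⟨o, os, rfl⟩
      rw [PySem.Chars.replace.go, pvRep]
      by_cases hp : (o :: os).isPrefixOf (c :: t) = true
      · simp only [hp, if_true, List.length_cons, List.drop_succ_cons, Nat.add_sub_cancel]
        rw [ih (t.drop os.length) (new.reverse ++ acc) (by simp at hl ⊢; omega)]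
        simp
      · simp only [hp, if_false, Bool.false_eq_true]
        rw [ih t (c :: acc) (by simp at hl ⊢; omega)]
        simp

theorem pvReplace_eq (old new l : List Char) (hold : old ≠ []) :
    PySem.Chars.replace l old new = pvRep old new l := by
  unfold PySem.Chars.replace
  rw [if_neg (by simpa [List.isEmpty_iff] using hold)]
  simpa using pvGo_eq old new hold l.length l [] le_rfl

-- prefix incomparability of two character lists
def pvIncomp (a b : List Char) : Bool := !(a.isPrefixOf b) && !(b.isPrefixOf a)

theorem pvNot_prefix_append {a u : List Char} (h : pvIncomp u a = true) (X : List Char) :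
    ¬ a.isPrefixOf (u ++ X) = true := by
  intro hp
  simp only [pvIncomp, Bool.and_eq_true, Bool.not_eq_true'] at h
  rw [List.isPrefixOf_iff_prefix] at hp
  rcases List.prefix_or_prefix_of_prefix hp (List.prefix_append u X) with h1 | h1
  · rw [← List.isPrefixOf_iff_prefix, h.2] at h1
    exact absurd h1 (by simp)
  · rw [← List.isPrefixOf_iff_prefix, h.1] at h1
    exact absurd h1 (by simp)

theorem pvIncomp_symm {a b : List Char} (h : pvIncomp a b = true) : pvIncomp b a = true := by
  simp only [pvIncomp, Bool.and_eq_true] at h ⊢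
  exact ⟨h.2, h.1⟩

-- no suffix of u (as a prefix position) can start a match of old
def pvIndep (u old : List Char) : Bool :=
  (List.range u.length).all fun d => pvIncomp (u.drop d) old

theorem pvIndep_tail {c : Char} {u old : List Char} (h : pvIndep (c :: u) old = true) :
    pvIndep u old = true := by
  simp only [pvIndep, List.all_eq_true, List.mem_range] at h ⊢
  intro d hd
  have := h (d + 1) (by simpa using Nat.succ_lt_succ hd)
  simpa using this

theorem pvRep_append_of_indep (old new : List Char) (u : List Char)
    (hI : pvIndep u old = true) : ∀ X, pvRep old new (u ++ X) = u ++ pvRep old new X := by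
  induction u with
  | nil => intro X; rfl
  | cons c u' ih =>
    intro X
    have h0 : pvIncomp (c :: u') old = true := by
      simp only [pvIndep, List.all_eq_true, List.mem_range] at hI
      simpa using hI 0 (by simp)
    have hnp : ¬ old.isPrefixOf ((c :: u') ++ X) = true := pvNot_prefix_append h0 X
    rw [List.cons_append] at hnp
    rw [List.cons_append, pvRep, if_neg hnp, ih (pvIndep_tail hI) X]
    simp

theorem pvRep_prefix (old new X : List Char) (hold : old ≠ []) :
    pvRep old new (old ++ X) = new ++ pvRep old new X := by
  obtain ⟨o, os, rfl⟩ : ∃ o os, old = o :: os := by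
    cases old with
    | nil => exact absurd rfl hold
    | cons o os => exact ⟨o, os, rfl⟩
  rw [List.cons_append, pvRep,
    if_pos (List.isPrefixOf_iff_prefix.mpr ⟨X, by simp⟩)]
  simp [List.drop_left']

-- safety: no (nonempty) suffix of OM matching at the front of a replacement output NJ ++ …
-- unless it already matched OJ
def pvSafe (OM OJ NJ : List Char) : Bool :=
  (List.range (OM.length + 1)).all fun d =>
    (OM.drop d).isEmpty || pvIncomp (OM.drop d) NJ || (OM.drop d).isPrefixOf OJ

theorem pvNo_create (OM OJ NJ : List Char) (_hOJ : OJ ≠ []) (hs : pvSafe OM OJ NJ = true) :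
    ∀ x d, (OM.drop d).isPrefixOf (pvRep OJ NJ x) = true → (OM.drop d).isPrefixOf x = true := by
  intro x
  induction x with
  | nil =>
    intro d h
    rw [pvRep] at h
    simpa using h
  | cons c t ih =>
    intro d h
    by_cases hd : OM.length ≤ d
    · simp [List.drop_eq_nil_of_le hd]
    · have hd' : d < OM.length := Nat.lt_of_not_le hd
      have hsd := by
        simp only [pvSafe, List.all_eq_true, List.mem_range] at hs
        exact hs d (by omega)
      by_cases hp : OJ.isPrefixOf (c :: t) = true
      · rw [pvRep, if_pos hp] at h
        rcases Bool.or_eq_true _ _ |>.mp hsd with hsd | hsd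
        · rcases Bool.or_eq_true _ _ |>.mp hsd with hsd | hsd
          · -- OM.drop d empty
            have : OM.drop d = [] := by simpa [List.isEmpty_iff] using hsd
            simp [this]
          · exact absurd h (pvNot_prefix_append (pvIncomp_symm hsd) _)
        · -- (OM.drop d) <+: OJ, and OJ <+: c :: t
          have h1 : OM.drop d <+: OJ := List.isPrefixOf_iff_prefix.mp hsd
          have h2 : OJ <+: c :: t := List.isPrefixOf_iff_prefix.mp hp
          exact List.isPrefixOf_iff_prefix.mpr (h1.trans h2)
      · rw [pvRep, if_neg hp] at h
        cases hOMd : OM.drop d with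
        | nil => simp
        | cons e om =>
          rw [hOMd] at h
          rw [List.isPrefixOf_iff_prefix, List.cons_prefix_cons] at h
          obtain ⟨rfl, hom⟩ := h
          have hdrop : OM.drop (d + 1) = om := by
            have : OM.drop (d + 1) = (OM.drop d).drop 1 := by
              rw [List.drop_drop]
            rw [this, hOMd]; rfl
          have := ih (d + 1) (by rw [hdrop]; exact List.isPrefixOf_iff_prefix.mpr hom)
          rw [hdrop] at this
          rw [List.isPrefixOf_iff_prefix, List.cons_prefix_cons]
          exact ⟨rfl, List.isPrefixOf_iff_prefix.mp this⟩

-- the composition of the nine replaces, as A performs it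
def pvComp (ps : List (List Char × List Char)) (l : List Char) : List Char :=
  ps.foldl (fun acc p => pvRep p.1 p.2 acc) l

theorem pvComp_append (ps qs : List (List Char × List Char)) (l : List Char) :
    pvComp (ps ++ qs) l = pvComp qs (pvComp ps l) := by
  simp [pvComp, List.foldl_append]

theorem pvComp_pass (u : List Char) :
    ∀ (ps : List (List Char × List Char)) (x : List Char),
      (∀ p ∈ ps, pvIndep u p.1 = true) →
      pvComp ps (u ++ x) = u ++ pvComp ps x := by
  intro ps
  induction ps with
  | nil => intro x _; rfl
  | cons p ps ih =>
    intro x hind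
    show pvComp ps (pvRep p.1 p.2 (u ++ x)) = u ++ pvComp ps (pvRep p.1 p.2 x)
    rw [pvRep_append_of_indep p.1 p.2 u (hind p (by simp)) x]
    exact ih (pvRep p.1 p.2 x) (fun q hq => hind q (by simp [hq]))

theorem pvComp_cons (c : Char) :
    ∀ (ps : List (List Char × List Char)) (x : List Char),
      (∀ p ∈ ps, ∀ q ∈ ps, pvSafe q.1 p.1 p.2 = true) →
      (∀ p ∈ ps, ¬ p.1.isPrefixOf (c :: x) = true) →
      pvComp ps (c :: x) = c :: pvComp ps x := by
  intro ps
  induction ps with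
  | nil => intro x _ _; rfl
  | cons p ps ih =>
    intro x hsafe hfront
    have hpne : p.1 ≠ [] := by
      intro h0
      exact hfront p (by simp) (by simp [h0])
    show pvComp ps (pvRep p.1 p.2 (c :: x)) = c :: pvComp ps (pvRep p.1 p.2 x)
    rw [pvRep, if_neg (hfront p (by simp))]
    refine ih (pvRep p.1 p.2 x) (fun a ha b hb => hsafe a (by simp [ha]) b (by simp [hb])) ?_
    intro q hq hqp
    have hqne : q.1 ≠ [] := by
      intro h0
      exact hfront q (by simp [hq]) (by simp [h0])
    obtain ⟨e, om, hq1⟩ : ∃ e om, q.1 = e :: om := by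
      cases hql : q.1 with
      | nil => exact absurd hql hqne
      | cons e om => exact ⟨e, om, rfl⟩
    rw [hq1, List.isPrefixOf_iff_prefix, List.cons_prefix_cons] at hqp
    obtain ⟨rfl, hom⟩ := hqp
    have hsq : pvSafe q.1 p.1 p.2 = true := hsafe p (by simp) q (by simp [hq])
    have h1 : (q.1.drop 1).isPrefixOf (pvRep p.1 p.2 x) = true := by
      rw [hq1]
      simpa using List.isPrefixOf_iff_prefix.mpr hom
    have h2 := pvNo_create q.1 p.1 p.2 hpne hsq x 1 h1
    rw [hq1] at h2
    simp only [List.drop_succ_cons, List.drop_zero] at h2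
    exact hfront q (by simp [hq])
      (by rw [hq1, List.isPrefixOf_iff_prefix, List.cons_prefix_cons]
          exact ⟨rfl, List.isPrefixOf_iff_prefix.mp h2⟩)

-- table facts, checked by computation
theorem pvTbl_ne : ∀ p ∈ pvTable, p.1 ≠ [] := by decide
theorem pvTbl_nodup : pvTable.Nodup := by decide
theorem pvTbl_safe : ∀ p ∈ pvTable, ∀ q ∈ pvTable, pvSafe q.1 p.1 p.2 = true := by decide
theorem pvTbl_indep_old : ∀ p ∈ pvTable, ∀ q ∈ pvTable, p ≠ q → pvIndep p.1 q.1 = true := by decide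
theorem pvTbl_indep_new : ∀ p ∈ pvTable, ∀ q ∈ pvTable, pvIndep p.2 q.1 = true := by decide

theorem pvFind_some {l : List Char} :
    ∀ {ps : List (List Char × List Char)} {p}, pvFind l ps = some p →
      p ∈ ps ∧ p.1.isPrefixOf l = true := by
  intro ps
  induction ps with
  | nil => intro p h; simp [pvFind] at h
  | cons q ps ih =>
    intro p h
    rw [pvFind] at h
    by_cases hq : q.1.isPrefixOf l = true
    · rw [if_pos hq] at h
      obtain rfl : q = p := by simpa using h
      exact ⟨by simp, hq⟩
    · rw [if_neg hq] at h
      obtain ⟨h1, h2⟩ := ih h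
      exact ⟨by simp [h1], h2⟩

theorem pvFind_none {l : List Char} :
    ∀ {ps : List (List Char × List Char)}, pvFind l ps = none →
      ∀ p ∈ ps, ¬ p.1.isPrefixOf l = true := by
  intro ps
  induction ps with
  | nil => intro _ p hp; simp at hp
  | cons q ps ih =>
    intro h p hp
    rw [pvFind] at h
    by_cases hq : q.1.isPrefixOf l = true
    · rw [if_pos hq] at h; exact absurd h (by simp)
    · rw [if_neg hq] at h
      rcases List.mem_cons.mp hp with rfl | hp'
      · exact hq
      · exact ih h p hp'

theorem pvComp_nil : pvComp pvTable [] = [] := by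
  simp [pvComp, pvTable, List.foldl, pvRep]

theorem pvMain : ∀ (n : Nat) (l : List Char), l.length ≤ n → pvComp pvTable l = pvScanGo n l := by
  intro n
  induction n with
  | zero =>
    intro l hl
    have h0 : l = [] := List.eq_nil_of_length_eq_zero (Nat.le_zero.mp hl)
    subst h0
    rw [pvScanGo]; exact pvComp_nil
  | succ n ih =>
    intro l hl
    cases hF : pvFind l pvTable with
    | none =>
      cases l with
      | nil => rw [pvScanGo]; exact pvComp_nil
      | cons c t =>
        rw [show pvScanGo (n + 1) (c :: t) = c :: pvScanGo n t by
          rw [pvScanGo, hF]]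
        rw [pvComp_cons c pvTable t (fun p hp q hq => pvTbl_safe p hp q hq)
          (pvFind_none hF)]
        rw [ih t (by simpa using Nat.le_of_succ_le_succ hl)]
    | some p =>
      obtain ⟨hmem, hpre⟩ := pvFind_some hF
      have hpne : p.1 ≠ [] := pvTbl_ne p hmem
      obtain ⟨rest, hrest'⟩ := List.isPrefixOf_iff_prefix.mp hpre
      have hrest : l = p.1 ++ rest := hrest'.symm
      obtain ⟨pre, post, htbl⟩ := List.append_of_mem hmem
      have hnodup := pvTbl_nodup
      rw [htbl] at hnodup
      have hpnotpre : p ∉ pre := by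
        intro hin
        rcases List.nodup_cons.mp (List.nodup_middle.mp hnodup) with ⟨hnm, _⟩
        exact hnm (by simp [hin])
      have hindpre : ∀ q ∈ pre, pvIndep p.1 q.1 = true := by
        intro q hq
        have hqtbl : q ∈ pvTable := by rw [htbl]; exact List.mem_append_left _ hq
        have hqp : p ≠ q := fun h => hpnotpre (h ▸ hq)
        exact pvTbl_indep_old p hmem q hqtbl hqp
      have hindpost : ∀ q ∈ post, pvIndep p.2 q.1 = true := by
        intro q hq
        have hqtbl : q ∈ pvTable := by
          rw [htbl]; exact List.mem_append_right _ (List.mem_cons_of_mem _ hq)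
        exact pvTbl_indep_new p hmem q hqtbl
      have hA : pvComp pvTable l = p.2 ++ pvComp pvTable rest := by
        calc pvComp pvTable l
            = pvComp (p :: post) (pvComp pre (p.1 ++ rest)) := by
              rw [htbl, hrest, pvComp_append]
          _ = pvComp (p :: post) (p.1 ++ pvComp pre rest) := by
              rw [pvComp_pass p.1 pre rest hindpre]
          _ = pvComp post (pvRep p.1 p.2 (p.1 ++ pvComp pre rest)) := rfl
          _ = pvComp post (p.2 ++ pvRep p.1 p.2 (pvComp pre rest)) := by
              rw [pvRep_prefix p.1 p.2 _ hpne]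
          _ = p.2 ++ pvComp post (pvRep p.1 p.2 (pvComp pre rest)) := by
              rw [pvComp_pass p.2 post _ hindpost]
          _ = p.2 ++ pvComp post (pvComp (pre ++ [p]) rest) := by
              rw [pvComp_append pre [p] rest]; rfl
          _ = p.2 ++ pvComp ((pre ++ [p]) ++ post) rest := by
              rw [pvComp_append (pre ++ [p]) post rest]
          _ = p.2 ++ pvComp pvTable rest := by
              rw [htbl]; simp
      cases l with
      | nil =>
        exact absurd (List.isPrefixOf_iff_prefix.mp hpre)
          (by simpa [List.prefix_nil] using hpne)
      | cons c t =>
        rw [show pvScanGo (n + 1) (c :: t) = p.2 ++ pvScanGo n (t.drop (p.1.length - 1)) by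
          rw [pvScanGo, hF]]
        obtain ⟨o, os, ho⟩ : ∃ o os, p.1 = o :: os := by
          cases hp1 : p.1 with
          | nil => exact absurd hp1 hpne
          | cons o os => exact ⟨o, os, rfl⟩
        have hto : t.drop (p.1.length - 1) = rest := by
          rw [ho] at hrest
          rw [List.cons_append] at hrest
          obtain ⟨rfl, rfl⟩ : c = o ∧ t = os ++ rest := by
            have h1 := congrArg (List.headI) hrest
            have h2 := congrArg (List.tail) hrest
            simp at h1 h2
            exact ⟨h1, h2⟩
          rw [ho]
          simp [List.drop_left']
        rw [hto, hA]
        have hlen : rest.length ≤ n := by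
          have := congrArg List.length hrest
          simp [ho] at this hl
          omega
        rw [ih rest hlen]

theorem pvChain (line : String) : change_1a line = String.ofList (pvComp pvTable line.toList) := by
  unfold change_1a
  simp only [List.foldl, PySem.Str.replace, String.toList_ofList]
  repeat' rw [pvReplace_eq]
  · simp only [pvComp, pvTable, List.foldl]
  all_goals decide

-- ===== VERDICT (by name: the statement is the Claim_ definition above) =====
theorem change_1a_spec : Claim_equal_change_1a := by
  intro line _
  show change_1a line = change_1a_alt line
  rw [pvChain]
  unfold change_1a_alt pvScan
  exact congrArg String.ofList (pvMain line.toList.length line.toList le_rfl)
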